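-- pv_equiv track=rewrite | github.com/ChunqiGuo02/NeXus | mcp-servers/pipeline-orchestrator/venue_tier_registry.py | get_all_tier1_venues
-- ===== SOURCE A (Python) =====
-- DEFAULT_TIERS: dict[str, dict[str, list[str]]] = {
--     "ai_ml": {
--         "tier_1": ["NeurIPS", "ICML", "ICLR"],
--         "tier_2": ["AAAI", "IJCAI", "AISTATS", "UAI", "CoLT"],
--         "tier_3": ["ACML", "ECML-PKDD", "AutoML Conf"],
--     },
--     "cv": {
--         "tier_1": ["CVPR", "ICCV"],
--         "tier_2": ["ECCV", "ACM MM"],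
--         "tier_3": ["WACV", "BMVC", "ICIP", "ICPR"],
--     },
--     "nlp": {
--         "tier_1": ["ACL"],
--         "tier_2": ["EMNLP", "Findings of ACL/EMNLP"],
--         "tier_3": ["NAACL", "COLING", "EACL", "AACL", "LREC"],
--     },
--     "robotics": {
--         "tier_1": ["RSS", "CoRL"],
--         "tier_2": ["ICRA", "IROS"],
--         "tier_3": ["Humanoids", "ISER", "RoboSoft"],
--     },
--     "data_mining": {
--         "tier_1": ["KDD", "WWW", "SIGIR", "WSDM"],
--         "tier_2": ["CIKM", "ICDM", "SDM", "ECIR"],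
--         "tier_3": ["PAKDD", "DASFAA", "WISE"],
--     },
--     "journals": {
--         "tier_1": ["TPAMI", "IJCV", "JMLR", "TACL", "Nature MI"],
--         "tier_2": ["TIP", "TNNLS", "PR", "TMM", "TKDE"],
--         "tier_3": ["Neurocomputing", "NCAA", "ESWA"],
--     },
-- }
--
-- def get_all_tier1_venues(
--     user_overrides: dict | None = None,
-- ) -> list[str]:
--     """返回所有领域的 Tier-1 venues。"""
--     tiers = _merge_tiers(user_overrides)
--     result: list[str] = []
--     for field_tiers in tiers.values():
--         result.extend(field_tiers.get("tier_1", []))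
--     return result
--
-- def _merge_tiers(user_overrides: dict | None) -> dict:
--     """合并默认 tiers 和用户覆盖。"""
--     import copy
--
--     result = copy.deepcopy(DEFAULT_TIERS)
--     if not user_overrides:
--         return result
--
--     for field, field_tiers in user_overrides.items():
--         if field not in result:
--             result[field] = {}
--         for tier_name, venues in field_tiers.items():
--             if tier_name in result[field]:
--                 # 追加去重
--                 existing = {v.lower() for v in result[field][tier_name]}
--                 for v in venues:
--                     if v.lower() not in existing:
--                         result[field][tier_name].append(v)
--             else:
--                 result[field][tier_name] = venues
--
--     return result
-- ===== SOURCE B (Python) =====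
-- DEFAULT_TIERS: dict[str, dict[str, list[str]]] = {
--     "ai_ml": {
--         "tier_1": ["NeurIPS", "ICML", "ICLR"],
--         "tier_2": ["AAAI", "IJCAI", "AISTATS", "UAI", "CoLT"],
--         "tier_3": ["ACML", "ECML-PKDD", "AutoML Conf"],
--     },
--     "cv": {
--         "tier_1": ["CVPR", "ICCV"],
--         "tier_2": ["ECCV", "ACM MM"],
--         "tier_3": ["WACV", "BMVC", "ICIP", "ICPR"],
--     },
--     "nlp": {
--         "tier_1": ["ACL"],
--         "tier_2": ["EMNLP", "Findings of ACL/EMNLP"],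
--         "tier_3": ["NAACL", "COLING", "EACL", "AACL", "LREC"],
--     },
--     "robotics": {
--         "tier_1": ["RSS", "CoRL"],
--         "tier_2": ["ICRA", "IROS"],
--         "tier_3": ["Humanoids", "ISER", "RoboSoft"],
--     },
--     "data_mining": {
--         "tier_1": ["KDD", "WWW", "SIGIR", "WSDM"],
--         "tier_2": ["CIKM", "ICDM", "SDM", "ECIR"],
--         "tier_3": ["PAKDD", "DASFAA", "WISE"],
--     },
--     "journals": {
--         "tier_1": ["TPAMI", "IJCV", "JMLR", "TACL", "Nature MI"],
--         "tier_2": ["TIP", "TNNLS", "PR", "TMM", "TKDE"],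
--         "tier_3": ["Neurocomputing", "NCAA", "ESWA"],
--     },
-- }
--
--
-- def get_all_tier1_venues(user_overrides: dict | None = None) -> list[str]:
--     """Tier-1 venues of every field, overrides merged on the fly (no deep copy)."""
--     overrides = user_overrides or {}
--     result: list[str] = []
--     for field, tiers in DEFAULT_TIERS.items():
--         base = tiers["tier_1"]
--         result.extend(base)
--         extra = overrides.get(field, {}).get("tier_1", [])
--         existing = {v.lower() for v in base}
--         result.extend(v for v in extra if v.lower() not in existing)
--     for field, tiers in overrides.items():
--         if field not in DEFAULT_TIERS:
--             result.extend(tiers.get("tier_1", []))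
--     return result
-- ===== Notes on version B (the rewrite author's own statement) =====
-- stated objective: simpler
-- what changed: B drops A's deep-copy-everything merge of the full tier structure: it makes one pass over the default fields, emitting each field's tier_1 list followed by the override tier_1 venues whose lowercase form is not already in that list, then one pass over the overrides emitting tier_1 lists of fields absent from the defaults; no merged dict is ever built.
import Mathlib
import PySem

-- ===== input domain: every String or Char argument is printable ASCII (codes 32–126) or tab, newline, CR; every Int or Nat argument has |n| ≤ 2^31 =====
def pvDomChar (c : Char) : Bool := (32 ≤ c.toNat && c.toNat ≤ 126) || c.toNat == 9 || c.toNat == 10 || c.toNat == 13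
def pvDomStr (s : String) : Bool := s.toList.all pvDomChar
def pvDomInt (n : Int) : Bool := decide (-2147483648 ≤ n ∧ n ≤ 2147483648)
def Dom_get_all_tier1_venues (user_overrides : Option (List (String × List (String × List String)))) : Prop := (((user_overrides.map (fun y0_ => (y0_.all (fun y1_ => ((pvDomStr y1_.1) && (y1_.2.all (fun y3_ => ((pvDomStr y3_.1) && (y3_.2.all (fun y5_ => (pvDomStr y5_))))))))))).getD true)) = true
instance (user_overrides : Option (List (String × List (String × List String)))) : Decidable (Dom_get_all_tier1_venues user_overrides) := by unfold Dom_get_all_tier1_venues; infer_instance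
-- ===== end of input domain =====

-- B replaces A's deepcopy-and-merge of the whole tier table by two direct passes
-- (defaults with inline case-insensitive dedup of override tier_1 venues, then
-- override-only fields); objective: simpler.


-- ===== PORT A =====
-- module constant DEFAULT_TIERS (a dict of dicts, ported as PySem.Dict)
def DEFAULT_TIERS : PySem.Dict String (PySem.Dict String (List String)) := PySem.Dict.mk [
  ("ai_ml", PySem.Dict.mk [
    ("tier_1", ["NeurIPS", "ICML", "ICLR"]),
    ("tier_2", ["AAAI", "IJCAI", "AISTATS", "UAI", "CoLT"]),
    ("tier_3", ["ACML", "ECML-PKDD", "AutoML Conf"])]),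
  ("cv", PySem.Dict.mk [
    ("tier_1", ["CVPR", "ICCV"]),
    ("tier_2", ["ECCV", "ACM MM"]),
    ("tier_3", ["WACV", "BMVC", "ICIP", "ICPR"])]),
  ("nlp", PySem.Dict.mk [
    ("tier_1", ["ACL"]),
    ("tier_2", ["EMNLP", "Findings of ACL/EMNLP"]),
    ("tier_3", ["NAACL", "COLING", "EACL", "AACL", "LREC"])]),
  ("robotics", PySem.Dict.mk [
    ("tier_1", ["RSS", "CoRL"]),
    ("tier_2", ["ICRA", "IROS"]),
    ("tier_3", ["Humanoids", "ISER", "RoboSoft"])]),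
  ("data_mining", PySem.Dict.mk [
    ("tier_1", ["KDD", "WWW", "SIGIR", "WSDM"]),
    ("tier_2", ["CIKM", "ICDM", "SDM", "ECIR"]),
    ("tier_3", ["PAKDD", "DASFAA", "WISE"])]),
  ("journals", PySem.Dict.mk [
    ("tier_1", ["TPAMI", "IJCV", "JMLR", "TACL", "Nature MI"]),
    ("tier_2", ["TIP", "TNNLS", "PR", "TMM", "TKDE"]),
    ("tier_3", ["Neurocomputing", "NCAA", "ESWA"])])]

-- one iteration of _merge_tiers' inner loop 'for tier_name, venues in field_tiers.items(): …'
-- ('if tier_name in result[field]' is the some/none match; the append-dedup loop is the foldl)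
def pvMergeOne (fd : PySem.Dict String (List String)) (p : String × List String) : PySem.Dict String (List String) :=
  match fd.get? p.1 with
  | some cur =>
      -- existing = {v.lower() for v in result[field][tier_name]}
      let existing := PySem.Set.ofList (cur.map (fun v => PySem.Str.lower v))
      fd.insert p.1 (p.2.foldl (fun lst v => if PySem.Str.lower v ∈ existing then lst else lst ++ [v]) cur)
  | none => fd.insert p.1 p.2

-- the inner loop over field_tiers.items(), mutating result[field] (here: the functional dict fd)
def pvMergeField (fd : PySem.Dict String (List String)) (field_tiers : List (String × List String)) : PySem.Dict String (List String) :=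
  field_tiers.foldl pvMergeOne fd

-- one iteration of _merge_tiers' outer loop: 'if field not in result: result[field] = {}' plus the
-- inner mutation loop is the functional insert of pvMergeField applied to result.get(field, {})
-- (insert keeps position for existing keys, appends new keys — Python dict semantics)
def pvStep (result : PySem.Dict String (PySem.Dict String (List String))) (p : String × List (String × List String)) : PySem.Dict String (PySem.Dict String (List String)) :=
  result.insert p.1 (pvMergeField (PySem.Dict.getD result p.1 (PySem.Dict.mk [])) p.2)

-- _merge_tiers: deepcopy is the identity on immutable values; 'if not user_overrides: return result'
-- coincides with folding over the empty items list, so both None and {} fall to the fold.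
def pvMergeTiers (user_overrides : Option (List (String × List (String × List String)))) : PySem.Dict String (PySem.Dict String (List String)) :=
  match user_overrides with
  | none => DEFAULT_TIERS
  | some l => l.foldl pvStep DEFAULT_TIERS

-- get_all_tier1_venues: 'for field_tiers in tiers.values(): result.extend(field_tiers.get("tier_1", []))'
def get_all_tier1_venues (user_overrides : Option (List (String × List (String × List String)))) : List String :=
  (pvMergeTiers user_overrides).values.foldl (fun acc fd => acc ++ PySem.Dict.getD fd "tier_1" []) []

-- ===== PORT B =====
-- overrides.get(field, {}).get("tier_1", []): first-match association-list lookup (dict semantics)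
def pvOverrideTier1 (ov : List (String × List (String × List String))) (field : String) : List String :=
  (List.lookup "tier_1" ((List.lookup field ov).getD [])).getD []

def get_all_tier1_venues_alt (user_overrides : Option (List (String × List (String × List String)))) : List String :=
  let ov := user_overrides.getD []
  -- pass 1: default fields in table order; base tier_1 then case-insensitively new override venues
  let part1 := DEFAULT_TIERS.items.foldl (fun acc p =>
    let base := PySem.Dict.getD p.2 "tier_1" []   -- tiers["tier_1"]; every default field has it
    let extra := pvOverrideTier1 ov p.1
    let existing := PySem.Set.ofList (base.map (fun v => PySem.Str.lower v))
    acc ++ base ++ extra.filter (fun v => !(decide (PySem.Str.lower v ∈ existing)))) []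
  -- pass 2: override-only fields in insertion order
  ov.foldl (fun acc q =>
    if DEFAULT_TIERS.contains q.1 then acc
    else acc ++ ((List.lookup "tier_1" q.2).getD [])) part1

-- ===== PRECONDITION & SPEC =====
-- Pre_ keeps only association lists that actually represent Python dicts (no duplicate keys,
-- outer or inner): a Python dict cannot hold two entries with the same key, so lists with
-- duplicates correspond to no dict input and the ports' behaviour on them is unspecified.
def Pre_get_all_tier1_venues (user_overrides : Option (List (String × List (String × List String)))) : Prop :=
  ((user_overrides.getD []).map Prod.fst).Nodup ∧ ∀ p ∈ user_overrides.getD [], (p.2.map Prod.fst).Nodup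

instance (user_overrides : Option (List (String × List (String × List String)))) : Decidable (Pre_get_all_tier1_venues user_overrides) := by unfold Pre_get_all_tier1_venues; infer_instance

def pvWitness_get_all_tier1_venues : (Option (List (String × List (String × List String)))) :=
  some [("ai_ml", [("tier_1", ["icml", "GECCO"])]), ("quantum", [("tier_1", ["QIP"]), ("tier_2", ["TQC"])])]

def Spec_get_all_tier1_venues (user_overrides : Option (List (String × List (String × List String)))) (out : List String) : Prop := out = get_all_tier1_venues_alt user_overrides
instance (user_overrides : Option (List (String × List (String × List String)))) (out : List String) : Decidable (Spec_get_all_tier1_venues user_overrides out) := by unfold Spec_get_all_tier1_venues; infer_instance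

-- ===== CLAIM (what is proved, stated in full; the proofs are below) =====
def Claim_equal_get_all_tier1_venues : Prop := ∀ (user_overrides : Option (List (String × List (String × List String)))), Dom_get_all_tier1_venues user_overrides → Pre_get_all_tier1_venues user_overrides → Spec_get_all_tier1_venues user_overrides (get_all_tier1_venues user_overrides)

-- ===== LEMMAS AND PROOFS =====

theorem pv_lookup_eq_none {ν : Type} (a : String) (l : List (String × ν)) (h : a ∉ l.map Prod.fst) : List.lookup a l = none := by
  induction l with
  | nil => rfl
  | cons p rest ih =>
    obtain ⟨k, v⟩ := p
    simp only [List.map_cons, List.mem_cons, not_or] at h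
    have hb : (a == k) = false := beq_eq_false_iff_ne.mpr h.1
    simp [List.lookup, hb, ih h.2]

theorem pv_mem_of_lookup {ν : Type} (a : String) (b : ν) (l : List (String × ν)) (h : List.lookup a l = some b) : (a, b) ∈ l := by
  induction l with
  | nil => simp [List.lookup] at h
  | cons p rest ih =>
    obtain ⟨k, v⟩ := p
    by_cases hk : a = k
    · subst hk; simp [List.lookup] at h; simp [h]
    · have hb : (a == k) = false := beq_eq_false_iff_ne.mpr hk
      simp only [List.lookup, hb] at h
      exact List.mem_cons_of_mem _ (ih h)

theorem pv_flatMap_if {α β : Type} (g : α → List β) (c : α → Bool) (l : List α) :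
    (l.flatMap fun q => if c q then [] else g q) = (l.filter fun q => !c q).flatMap g := by
  induction l with
  | nil => rfl
  | cons x rest ih => by_cases hx : c x <;> simp [hx, ih]

-- pvMergeOne at a key other than "tier_1" leaves the "tier_1" entry alone
theorem pvMergeOne_get?_of_ne (fd : PySem.Dict String (List String)) (p : String × List String)
    (h : p.1 ≠ "tier_1") : (pvMergeOne fd p).get? "tier_1" = fd.get? "tier_1" := by
  cases hg : fd.get? p.1 <;>
    simp only [pvMergeOne, hg] <;>
    exact PySem.Dict.get?_insert_of_ne _ _ (Ne.symm h)

-- a field_tiers loop that never sees "tier_1" leaves the "tier_1" entry alone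
theorem pvMergeField_get?_of_not_mem (ft : List (String × List String)) (fd : PySem.Dict String (List String))
    (h : "tier_1" ∉ ft.map Prod.fst) : (pvMergeField fd ft).get? "tier_1" = fd.get? "tier_1" := by
  induction ft generalizing fd with
  | nil => rfl
  | cons p rest ih =>
    simp only [List.map_cons, List.mem_cons, not_or] at h
    show (pvMergeField (pvMergeOne fd p) rest).get? "tier_1" = _
    rw [ih _ h.2, pvMergeOne_get?_of_ne _ _ (fun hp => h.1 hp.symm)]

-- what the merge loop does to the "tier_1" entry: append-dedup onto an existing entry,
-- plain assignment to a missing one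
theorem pvMergeField_get?_tier1 (ft : List (String × List String)) (fd : PySem.Dict String (List String))
    (hft : (ft.map Prod.fst).Nodup) :
    (pvMergeField fd ft).get? "tier_1" =
      match fd.get? "tier_1" with
      | some base => some (base ++ ((List.lookup "tier_1" ft).getD []).filter
          (fun v => !(decide (PySem.Str.lower v ∈ PySem.Set.ofList (base.map (fun v => PySem.Str.lower v))))))
      | none => List.lookup "tier_1" ft := by
  induction ft generalizing fd with
  | nil => cases hg : fd.get? "tier_1" <;> simp [pvMergeField, List.lookup, hg]
  | cons p rest ih =>
    obtain ⟨k, vs⟩ := p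
    simp only [List.map_cons, List.nodup_cons] at hft
    show (pvMergeField (pvMergeOne fd (k, vs)) rest).get? "tier_1" = _
    by_cases hk : k = "tier_1"
    · subst hk
      rw [pvMergeField_get?_of_not_mem rest _ hft.1]
      cases hg : fd.get? "tier_1" with
      | some cur =>
        simp only [pvMergeOne, hg, PySem.Dict.get?_insert_self, List.lookup, beq_self_eq_true,
          Option.getD_some]
        congr 1
        rw [PySem.List.foldl_congr_mem vs
          (fun lst v => if PySem.Str.lower v ∈ PySem.Set.ofList (cur.map (fun v => PySem.Str.lower v)) then lst else lst ++ [v])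
          (fun lst v => if (!(decide (PySem.Str.lower v ∈ PySem.Set.ofList (cur.map (fun v => PySem.Str.lower v))))) = true then lst ++ [v] else lst)
          cur (by intro acc x _; by_cases hm : PySem.Str.lower x ∈ PySem.Set.ofList (cur.map (fun v => PySem.Str.lower v)) <;> simp [hm]),
          PySem.List.foldl_append_if]
        simp
      | none =>
        simp [pvMergeOne, hg, PySem.Dict.get?_insert_self, List.lookup]
    · have hb : (("tier_1" : String) == k) = false := beq_eq_false_iff_ne.mpr (fun h => hk h.symm)
      rw [ih _ hft.2, pvMergeOne_get?_of_ne _ _ hk]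
      simp only [List.lookup, hb]

-- items of the outer merge loop: defaults (merged where overridden, in place) then new fields;
-- 'pvMergeField e.2 ((List.lookup e.1 l).getD [])' is e.2 itself when e.1 is not overridden
theorem pv_foldl_step_items (l : List (String × List (String × List String)))
    (d : PySem.Dict String (PySem.Dict String (List String)))
    (hd : d.keys.Nodup) (hl : (l.map Prod.fst).Nodup) :
    (l.foldl pvStep d).items =
      d.items.map (fun e => (e.1, pvMergeField e.2 ((List.lookup e.1 l).getD [])))
      ++ (l.filter (fun p => !(d.contains p.1))).map (fun p => (p.1, pvMergeField (PySem.Dict.mk []) p.2)) := by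
  induction l generalizing d with
  | nil => simp [List.lookup, pvMergeField]
  | cons p rest ih =>
    obtain ⟨f, ft⟩ := p
    simp only [List.map_cons, List.nodup_cons] at hl
    have hfr : f ∉ rest.map Prod.fst := hl.1
    have hd' : (pvStep d (f, ft)).keys.Nodup := PySem.Dict.nodup_keys_insert _ _ _ hd
    have hlk : List.lookup f rest = none := pv_lookup_eq_none f rest hfr
    rw [List.foldl_cons, ih _ hd' hl.2]
    have hrestfilter : rest.filter (fun q => !((pvStep d (f, ft)).contains q.1))
        = rest.filter (fun q => !(d.contains q.1)) := by
      apply List.filter_congr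
      intro q hq
      have hqf : q.1 ≠ f := by
        intro hqf; exact hfr (hqf ▸ List.mem_map_of_mem hq)
      simp only [pvStep, PySem.Dict.contains_insert, beq_eq_false_iff_ne.mpr hqf, Bool.false_or]
    by_cases hc : d.contains f
    · have hitems : (pvStep d (f, ft)).items
          = d.items.map (fun e => if e.1 == f then (f, pvMergeField (PySem.Dict.getD d f (PySem.Dict.mk [])) ft) else e) := by
        simp only [pvStep]
        exact PySem.Dict.items_insert_of_contains d _ hc
      rw [hitems, hrestfilter, List.map_map]
      have hmap : ∀ e ∈ d.items,
          ((fun e => (e.1, pvMergeField e.2 ((List.lookup e.1 rest).getD []))) ∘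
            (fun e => if e.1 == f then (f, pvMergeField (PySem.Dict.getD d f (PySem.Dict.mk [])) ft) else e)) e
          = (e.1, pvMergeField e.2 ((List.lookup e.1 ((f, ft) :: rest)).getD [])) := by
        intro e he
        by_cases hef : e.1 = f
        · have hb : (e.1 == f) = true := beq_iff_eq.mpr hef
          have hgd : PySem.Dict.getD d f (PySem.Dict.mk []) = e.2 := by
            apply PySem.Dict.getD_of_mem_items d _ hd
            rw [← hef]; exact he
          simp only [Function.comp, if_true, hgd, hlk, Option.getD_none, hef, List.lookup,
            beq_self_eq_true, Option.getD_some]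
          rfl
        · have hb : (e.1 == f) = false := beq_eq_false_iff_ne.mpr hef
          simp only [Function.comp, hb, Bool.false_eq_true, if_false, List.lookup]
      rw [List.map_congr_left hmap]
      have hfkeep : List.filter (fun p => !(d.contains p.1)) ((f, ft) :: rest)
          = List.filter (fun p => !(d.contains p.1)) rest := by
        simp [hc]
      rw [hfkeep]
    · have hcf : d.contains f = false := by simpa using hc
      have hgd : PySem.Dict.getD d f (PySem.Dict.mk []) = PySem.Dict.mk [] :=
        PySem.Dict.getD_of_not_contains d _ hcf
      have hitems : (pvStep d (f, ft)).items = d.items ++ [(f, pvMergeField (PySem.Dict.mk []) ft)] := by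
        simp only [pvStep, hgd]
        exact PySem.Dict.items_insert_of_not_contains d _ hcf
      have hfnotkey : ∀ e ∈ d.items, e.1 ≠ f := by
        intro e he hef
        have : d.contains f = true := by
          rw [PySem.Dict.contains_eq_decide_mem_keys]
          simp only [PySem.Dict.keys]
          exact decide_eq_true (hef ▸ List.mem_map_of_mem he)
        exact hc this
      rw [hitems, hrestfilter, List.map_append]
      have hmap : ∀ e ∈ d.items,
          (fun e => (e.1, pvMergeField e.2 ((List.lookup e.1 rest).getD []))) e
          = (e.1, pvMergeField e.2 ((List.lookup e.1 ((f, ft) :: rest)).getD [])) := by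
        intro e he
        have hb : (e.1 == f) = false := beq_eq_false_iff_ne.mpr (hfnotkey e he)
        simp only [List.lookup, hb]
      rw [List.map_congr_left hmap]
      have hsingle : List.map (fun e => (e.1, pvMergeField e.2 ((List.lookup e.1 rest).getD [])))
          [(f, pvMergeField (PySem.Dict.mk []) ft)]
          = [(f, pvMergeField (PySem.Dict.mk []) ft)] := by
        simp only [List.map_cons, List.map_nil, hlk, Option.getD_none]
        rfl
      rw [hsingle]
      simp [hcf, List.append_assoc]

-- a default entry with tier_1 = base, after the merge: base then the case-insensitively new override venues
theorem pv_entry_eq (l : List (String × List (String × List String)))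
    (hinner : ∀ p ∈ l, (p.2.map Prod.fst).Nodup)
    (e : String × PySem.Dict String (List String)) (base : List String)
    (hb : e.2.get? "tier_1" = some base) :
    PySem.Dict.getD (pvMergeField e.2 ((List.lookup e.1 l).getD [])) "tier_1" []
      = base ++ (pvOverrideTier1 l e.1).filter
          (fun v => !(decide (PySem.Str.lower v ∈ PySem.Set.ofList (base.map (fun v => PySem.Str.lower v))))) := by
  cases hlk : List.lookup e.1 l with
  | none =>
    simp [pvMergeField, pvOverrideTier1, hlk, PySem.Dict.getD_eq_get?_getD, hb]
  | some ft =>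
    have hftn : (ft.map Prod.fst).Nodup := hinner _ (pv_mem_of_lookup _ _ _ hlk)
    simp only [Option.getD_some]
    rw [PySem.Dict.getD_eq_get?_getD, pvMergeField_get?_tier1 ft e.2 hftn, hb]
    simp [pvOverrideTier1, hlk]

-- an override-only field contributes its tier_1 list (or nothing)
theorem pv_new_entry_eq (ft : List (String × List String)) (hn : (ft.map Prod.fst).Nodup) :
    PySem.Dict.getD (pvMergeField (PySem.Dict.mk []) ft) "tier_1" [] = (List.lookup "tier_1" ft).getD [] := by
  rw [PySem.Dict.getD_eq_get?_getD, pvMergeField_get?_tier1 ft _ hn]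
  rfl

-- ===== VERDICT (by name: the statement is the Claim_ definition above) =====
theorem get_all_tier1_venues_spec : Claim_equal_get_all_tier1_venues := by
  intro uo _ hpre
  unfold Spec_get_all_tier1_venues
  match uo with
  | none => rfl
  | some l =>
    obtain ⟨houter, hinner⟩ := hpre
    simp only [Option.getD_some] at houter hinner
    -- A side: flatten the collection loop, then rewrite the merged items
    rw [get_all_tier1_venues, PySem.List.foldl_append_eq_flatMap]
    rw [show (pvMergeTiers (some l)).values = (pvMergeTiers (some l)).items.map Prod.snd from rfl]
    rw [show pvMergeTiers (some l) = l.foldl pvStep DEFAULT_TIERS from rfl]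
    rw [pv_foldl_step_items l DEFAULT_TIERS (by decide) houter]
    simp only [List.map_append, List.flatMap_append, List.flatMap_map]
    have hA1 : DEFAULT_TIERS.items.flatMap
        (fun e => PySem.Dict.getD (pvMergeField e.2 ((List.lookup e.1 l).getD [])) "tier_1" [])
        = DEFAULT_TIERS.items.flatMap (fun p =>
            PySem.Dict.getD p.2 "tier_1" [] ++ (pvOverrideTier1 l p.1).filter
              (fun v => !(decide (PySem.Str.lower v ∈ PySem.Set.ofList ((PySem.Dict.getD p.2 "tier_1" []).map (fun v => PySem.Str.lower v)))))) := by
      apply List.flatMap_congr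
      intro e he
      have he' : e ∈ (PySem.Dict.mk [] : PySem.Dict String (PySem.Dict String (List String))).items ++ DEFAULT_TIERS.items := by
        simpa using he
      simp only [DEFAULT_TIERS, List.nil_append, List.mem_cons,
        List.not_mem_nil, or_false] at he'
      rcases he' with rfl | rfl | rfl | rfl | rfl | rfl <;>
        exact pv_entry_eq l hinner _ _ rfl
    have hA2 : (List.filter (fun p => !(DEFAULT_TIERS.contains p.1)) l).flatMap
        (fun p => PySem.Dict.getD (pvMergeField (PySem.Dict.mk []) p.2) "tier_1" [])
        = (List.filter (fun p => !(DEFAULT_TIERS.contains p.1)) l).flatMap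
            (fun q => (List.lookup "tier_1" q.2).getD []) := by
      apply List.flatMap_congr
      intro p hp
      exact pv_new_entry_eq p.2 (hinner p (List.mem_of_mem_filter hp))
    rw [hA1, hA2]
    -- B side: flatten its two passes the same way
    show _ = get_all_tier1_venues_alt (some l)
    simp only [get_all_tier1_venues_alt, Option.getD_some]
    rw [PySem.List.foldl_congr_mem DEFAULT_TIERS.items _
      (fun acc p => acc ++ (PySem.Dict.getD p.2 "tier_1" [] ++ (pvOverrideTier1 l p.1).filter
        (fun v => !(decide (PySem.Str.lower v ∈ PySem.Set.ofList ((PySem.Dict.getD p.2 "tier_1" []).map (fun v => PySem.Str.lower v)))))))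
      [] (by intro acc p _; simp [List.append_assoc])]
    rw [PySem.List.foldl_append_eq_flatMap]
    rw [PySem.List.foldl_congr_mem l _
      (fun acc q => acc ++ (if DEFAULT_TIERS.contains q.1 then [] else (List.lookup "tier_1" q.2).getD []))
      _ (by intro acc q _; by_cases hq : DEFAULT_TIERS.contains q.1 <;> simp [hq])]
    rw [PySem.List.foldl_append_eq_flatMap, pv_flatMap_if]
    simp
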